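-- pv_equiv track=rewrite | github.com/daiccy21/Perulangan | tugas2.py | ganjil
-- ===== SOURCE A (Python) =====
-- def ganjil(bawah, atas):
--     bilangan_ganjil = []
--
--     if bawah < atas:
--         for i in range(bawah, atas + 1):
--             if i % 2 != 0:
--                 bilangan_ganjil.append(i)
--     else:
--         for i in range(bawah, atas - 1, -1):
--             if i % 2 != 0:
--                 bilangan_ganjil.append(i)
--
--     return ', '.join(map(str, bilangan_ganjil))
-- ===== SOURCE B (Python) =====
-- def ganjil(bawah, atas):
--     # Jump straight from the first odd endpoint in steps of 2: no per-element parity test.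
--     if bawah < atas:
--         odds = range(bawah + (1 - bawah % 2), atas + 1, 2)
--     else:
--         odds = range(bawah - (1 - bawah % 2), atas - 1, -2)
--     return ', '.join(map(str, odds))
-- ===== Notes on version B (the rewrite author's own statement) =====
-- stated objective: alternative
-- what changed: Replaces A's per-element parity-filter loops by arithmetic: compute the first odd endpoint in closed form and enumerate the odds directly with a stride-2 range (stride -2 for the descending branch), so no modulo test runs per element.
import Mathlib
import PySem

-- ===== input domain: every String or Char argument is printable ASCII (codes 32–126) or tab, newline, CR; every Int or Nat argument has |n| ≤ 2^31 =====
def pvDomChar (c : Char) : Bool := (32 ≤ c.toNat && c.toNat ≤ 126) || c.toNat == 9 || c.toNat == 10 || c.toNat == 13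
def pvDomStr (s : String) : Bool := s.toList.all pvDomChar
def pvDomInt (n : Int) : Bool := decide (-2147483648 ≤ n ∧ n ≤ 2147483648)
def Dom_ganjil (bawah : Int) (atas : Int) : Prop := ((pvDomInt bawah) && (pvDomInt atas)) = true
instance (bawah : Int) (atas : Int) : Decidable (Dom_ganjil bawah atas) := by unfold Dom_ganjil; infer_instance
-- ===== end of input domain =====

-- B enumerates the odds directly with a stride-2 range starting at the first odd endpoint
-- (closed form), instead of A's per-element parity-filter loops (objective: alternative).

-- ===== PORT A =====
def ganjil (bawah : Int) (atas : Int) : String :=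
  let bilangan_ganjil : List Int :=
    if bawah < atas then
      (PySem.List.pyRange bawah (atas + 1) 1).foldl
        (fun acc i => if PySem.Int.mod i 2 != 0 then acc ++ [i] else acc) []
    else
      (PySem.List.pyRange bawah (atas - 1) (-1)).foldl
        (fun acc i => if PySem.Int.mod i 2 != 0 then acc ++ [i] else acc) []
  PySem.Str.join ", " (bilangan_ganjil.map PySem.Int.toStr)

-- ===== PORT B =====
def ganjil_alt (bawah : Int) (atas : Int) : String :=
  let odds : List Int :=
    if bawah < atas then
      PySem.List.pyRange (bawah + (1 - PySem.Int.mod bawah 2)) (atas + 1) 2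
    else
      PySem.List.pyRange (bawah - (1 - PySem.Int.mod bawah 2)) (atas - 1) (-2)
  PySem.Str.join ", " (odds.map PySem.Int.toStr)

-- ===== PRECONDITION & SPEC =====
def Spec_ganjil (bawah : Int) (atas : Int) (out : String) : Prop := out = ganjil_alt bawah atas
instance (bawah : Int) (atas : Int) (out : String) : Decidable (Spec_ganjil bawah atas out) := by unfold Spec_ganjil; infer_instance

-- ===== CLAIM =====
def Claim_equal_ganjil : Prop := ∀ (bawah : Int) (atas : Int), Dom_ganjil bawah atas → Spec_ganjil bawah atas (ganjil bawah atas)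

-- ===== LEMMAS AND PROOFS =====
theorem pv_mod_two (a : Int) : PySem.Int.mod a 2 = a % 2 := by
  simp [PySem.Int.mod, Int.fmod_eq_emod_of_nonneg _ (by norm_num : (0:Int) ≤ 2)]

theorem pv_pyRange_neg_two (a b : Int) :
    PySem.List.pyRange a b (-2) = (PySem.List.pyRange (-a) (-b) 2).map (fun x => -x) := by
  simp only [PySem.List.pyRange]
  norm_num
  refine congrArg₂ _ ?_ ?_
  · funext k; simp [Function.comp]; ring
  · have h : (-b + a : Int) = a - b := by ring
    rw [h]

theorem pv_pairwise_lt_pyRange_two (a b : Int) :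
    List.Pairwise (· < ·) (PySem.List.pyRange a b 2) := by
  rw [PySem.List.pyRange_of_pos a b (by norm_num)]
  rw [List.pairwise_map]
  exact List.pairwise_lt_range.imp (fun {k j} h => by omega)

theorem pv_mem_pyRange_two (a b x : Int) :
    x ∈ PySem.List.pyRange a b 2 ↔ a ≤ x ∧ x < b ∧ 2 ∣ x - a :=
  PySem.List.mem_pyRange_iff_of_pos (by norm_num) x

-- ascending branch: the filtered unit-step range IS the stride-2 range from the first odd
theorem pv_asc (a b : Int) :
    (PySem.List.pyRange a b 1).filter (fun i => PySem.Int.mod i 2 != 0)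
      = PySem.List.pyRange (a + (1 - PySem.Int.mod a 2)) b 2 := by
  have h1 : List.Pairwise (· < ·) ((PySem.List.pyRange a b 1).filter (fun i => PySem.Int.mod i 2 != 0)) :=
    (PySem.List.pairwise_lt_pyRange_one a b).filter _
  have h2 := pv_pairwise_lt_pyRange_two (a + (1 - PySem.Int.mod a 2)) b
  refine List.Perm.eq_of_pairwise (fun x y _ _ hxy hyx => absurd hxy (not_lt.mpr hyx.le)) h1 h2 ?_
  rw [List.perm_ext_iff_of_nodup (h1.imp fun h => ne_of_lt h) (h2.imp fun h => ne_of_lt h)]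
  intro x
  rw [List.mem_filter, PySem.List.mem_pyRange_one, pv_mem_pyRange_two,
    pv_mod_two, pv_mod_two]
  simp only [bne_iff_ne, ne_eq]
  omega

-- descending branch
theorem pv_desc (a b : Int) :
    (PySem.List.pyRange a b (-1)).filter (fun i => PySem.Int.mod i 2 != 0)
      = PySem.List.pyRange (a - (1 - PySem.Int.mod a 2)) b (-2) := by
  have h1 : List.Pairwise (· > ·) ((PySem.List.pyRange a b (-1)).filter (fun i => PySem.Int.mod i 2 != 0)) := by
    refine List.Pairwise.filter _ ?_
    rw [PySem.List.pyRange_neg_one, List.pairwise_map]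
    exact List.pairwise_lt_range.imp (fun {k j} h => by simp only [gt_iff_lt]; omega)
  have h2 : List.Pairwise (· > ·) (PySem.List.pyRange (a - (1 - PySem.Int.mod a 2)) b (-2)) := by
    rw [pv_pyRange_neg_two, List.pairwise_map]
    exact (pv_pairwise_lt_pyRange_two _ _).imp (fun {k j} h => by simp only [gt_iff_lt]; omega)
  refine List.Perm.eq_of_pairwise (fun x y _ _ hxy hyx => absurd hxy (not_lt.mpr hyx.le)) h1 h2 ?_
  rw [List.perm_ext_iff_of_nodup (h1.imp fun h => ne_of_gt h) (h2.imp fun h => ne_of_gt h)]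
  intro x
  rw [List.mem_filter, PySem.List.mem_pyRange_neg_one, pv_pyRange_neg_two, List.mem_map]
  constructor
  · rintro ⟨⟨hbx, hxa⟩, hodd⟩
    refine ⟨-x, ?_, by ring⟩
    rw [pv_mem_pyRange_two]
    rw [pv_mod_two] at hodd ⊢
    simp only [bne_iff_ne, ne_eq] at hodd
    omega
  · rintro ⟨y, hy, rfl⟩
    rw [pv_mem_pyRange_two] at hy
    rw [pv_mod_two] at hy ⊢
    simp only [bne_iff_ne, ne_eq]
    omega

theorem ganjil_lists_eq (bawah atas : Int) : ganjil bawah atas = ganjil_alt bawah atas := by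
  unfold ganjil ganjil_alt
  by_cases h : bawah < atas
  · simp only [if_pos h, PySem.List.foldl_append_if_eq_filter, List.nil_append, pv_asc]
  · simp only [if_neg h, PySem.List.foldl_append_if_eq_filter, List.nil_append, pv_desc]

-- ===== VERDICT =====
theorem ganjil_spec : Claim_equal_ganjil := by
  intro bawah atas _
  unfold Spec_ganjil
  exact ganjil_lists_eq bawah atas
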